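-- pv_equiv track=rewrite | github.com/CSCI-GA-2820-FA25-001/promotions | service/models.py | classify_duplicate_error
-- ===== SOURCE A (Python) =====
-- def classify_duplicate_error(error):
--     """Classify DataValidationError from duplicate operation into appropriate HTTP status codes"""
--     error_message = str(error).lower()
--
--     # Handle not found errors (404)
--     if "not found" in error_message:
--         return 404, "Not Found"
--
--     # Handle duplicate name conflicts (409)
--     if "duplicate" in error_message or "unique" in error_message or "1062" in error_message:
--         return 409, "Conflict"
--
--     # Handle business logic validation errors (422)
--     if any(keyword in error_message for keyword in [
--         "should be", "cannot", "discount_value should be", "discount_type should be",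
--         "chk_discount_value_valid", "chk_original_price_positive",
--         "chk_expiration_after_start", "chk_promotion_type_after_start"
--     ]):
--         return 422, "Unprocessable Entity"
--
--     # Handle other validation errors (400)
--     return 400, "Bad Request"
-- ===== SOURCE B (Python) =====
-- STATUS = {404: "Not Found", 409: "Conflict", 422: "Unprocessable Entity", 400: "Bad Request"}
--
-- KEYWORD_CODES = {
--     "not found": 404,
--     "duplicate": 409, "unique": 409, "1062": 409,
--     "should be": 422, "cannot": 422,
--     "discount_value should be": 422, "discount_type should be": 422,
--     "chk_discount_value_valid": 422, "chk_original_price_positive": 422,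
--     "chk_expiration_after_start": 422, "chk_promotion_type_after_start": 422,
-- }
--
--
-- def classify_duplicate_error(error):
--     """Collect every matching keyword's code in one pass, then aggregate:
--     the severity priority 404 > 409 > 422 coincides with the numeric order,
--     so the classification is simply the minimum matched code (400 if none)."""
--     message = str(error).lower()
--     code = min((c for k, c in KEYWORD_CODES.items() if k in message), default=400)
--     return code, STATUS[code]
-- ===== Notes on version B (the rewrite author's own statement) =====
-- stated objective: alternative
-- what changed: Instead of an ordered short-circuiting branch cascade, B collects the codes of ALL matching keywords in one pass over a keyword-to-code map and aggregates them with min (priority order coincides with numeric order, default 400), then maps the code to its reason phrase.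
import Mathlib
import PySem

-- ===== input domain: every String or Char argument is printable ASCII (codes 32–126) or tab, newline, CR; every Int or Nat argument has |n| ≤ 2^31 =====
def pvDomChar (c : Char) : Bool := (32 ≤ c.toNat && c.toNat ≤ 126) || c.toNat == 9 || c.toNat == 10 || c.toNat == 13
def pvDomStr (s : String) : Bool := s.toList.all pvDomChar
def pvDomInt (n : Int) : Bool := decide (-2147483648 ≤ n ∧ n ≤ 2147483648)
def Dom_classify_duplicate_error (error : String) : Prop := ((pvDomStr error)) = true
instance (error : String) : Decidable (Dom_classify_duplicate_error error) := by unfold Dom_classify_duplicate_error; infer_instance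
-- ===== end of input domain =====

-- B replaces A's ordered branch cascade by collect-all-matching-codes + min aggregation (alternative decomposition; same cost).

-- ===== PORT A =====
def classify_duplicate_error (error : String) : Int × String :=
  let error_message := PySem.Str.lower error
  if PySem.Str.isIn "not found" error_message then (404, "Not Found")
  else if PySem.Str.isIn "duplicate" error_message || PySem.Str.isIn "unique" error_message
          || PySem.Str.isIn "1062" error_message then (409, "Conflict")
  else if ([ "should be", "cannot", "discount_value should be", "discount_type should be",
             "chk_discount_value_valid", "chk_original_price_positive",
             "chk_expiration_after_start", "chk_promotion_type_after_start"
           ].any (fun k => PySem.Str.isIn k error_message)) then (422, "Unprocessable Entity")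
  else (400, "Bad Request")

-- ===== PORT B =====
def pvStatus : PySem.Dict Int String :=
  PySem.Dict.ofList [(404, "Not Found"), (409, "Conflict"), (422, "Unprocessable Entity"), (400, "Bad Request")]

def pvKeywordCodes : List (String × Int) :=
  [ ("not found", 404),
    ("duplicate", 409), ("unique", 409), ("1062", 409),
    ("should be", 422), ("cannot", 422),
    ("discount_value should be", 422), ("discount_type should be", 422),
    ("chk_discount_value_valid", 422), ("chk_original_price_positive", 422),
    ("chk_expiration_after_start", 422), ("chk_promotion_type_after_start", 422) ]

-- the generator '(c for k, c in KEYWORD_CODES.items() if k in message)'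
def pvCodes (message : String) : List Int :=
  (pvKeywordCodes.filter (fun kc => PySem.Str.isIn kc.1 message)).map Prod.snd

def classify_duplicate_error_alt (error : String) : Int × String :=
  let message := PySem.Str.lower error
  -- min(codes generator, default=400)
  let code := (PySem.List.min? (pvCodes message) (fun x => x)).getD 400
  -- STATUS[code]; KeyError is unreachable since code ∈ {400, 404, 409, 422}
  (code, (PySem.Dict.get? pvStatus code).getD "")

-- ===== PRECONDITION & SPEC =====
def Spec_classify_duplicate_error (error : String) (out : Int × String) : Prop := out = classify_duplicate_error_alt error
instance (error : String) (out : Int × String) : Decidable (Spec_classify_duplicate_error error out) := by unfold Spec_classify_duplicate_error; infer_instance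

-- ===== CLAIM (what is proved, stated in full; the proofs are below) =====
def Claim_equal_classify_duplicate_error : Prop := ∀ (error : String), Dom_classify_duplicate_error error → Spec_classify_duplicate_error error (classify_duplicate_error error)

-- ===== LEMMAS AND PROOFS =====

theorem mem_pvCodes (m : String) (c : Int) :
    c ∈ pvCodes m ↔ ∃ k, (k, c) ∈ pvKeywordCodes ∧ PySem.Str.isIn k m = true := by
  unfold pvCodes
  constructor
  · intro h
    rcases List.mem_map.1 h with ⟨kc, hkc, hsnd⟩
    rcases List.mem_filter.1 hkc with ⟨hmem, hp⟩
    exact ⟨kc.1, by rw [show (kc.1, c) = kc from by rw [← hsnd]]; exact hmem, hp⟩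
  · rintro ⟨k, hmem, hin⟩
    exact List.mem_map.2 ⟨(k, c), List.mem_filter.2 ⟨hmem, hin⟩, rfl⟩

-- every code in pvCodes m comes with its matching keyword group
theorem pvCodes_classified (m : String) (c : Int) (hc : c ∈ pvCodes m) :
    (c = 404 ∧ PySem.Str.isIn "not found" m = true) ∨
    (c = 409 ∧ (PySem.Str.isIn "duplicate" m || PySem.Str.isIn "unique" m || PySem.Str.isIn "1062" m) = true) ∨
    (c = 422 ∧ ([ "should be", "cannot", "discount_value should be", "discount_type should be",
                  "chk_discount_value_valid", "chk_original_price_positive",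
                  "chk_expiration_after_start", "chk_promotion_type_after_start"
                ].any (fun k => PySem.Str.isIn k m)) = true) := by
  rcases (mem_pvCodes m c).1 hc with ⟨k, hmem, hin⟩
  simp only [pvKeywordCodes, List.mem_cons, List.not_mem_nil, or_false, Prod.mk.injEq] at hmem
  rcases hmem with ⟨hk, hcv⟩ | ⟨hk, hcv⟩ | ⟨hk, hcv⟩ | ⟨hk, hcv⟩ | ⟨hk, hcv⟩ | ⟨hk, hcv⟩
    | ⟨hk, hcv⟩ | ⟨hk, hcv⟩ | ⟨hk, hcv⟩ | ⟨hk, hcv⟩ | ⟨hk, hcv⟩ | ⟨hk, hcv⟩ <;>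
    subst hk <;> subst hcv <;> simp at hin ⊢ <;> tauto

theorem pvCodes_min_eq (m : String) :
    ((PySem.List.min? (pvCodes m) (fun x => x)).getD 400) =
    (if PySem.Str.isIn "not found" m then (404 : Int)
     else if PySem.Str.isIn "duplicate" m || PySem.Str.isIn "unique" m || PySem.Str.isIn "1062" m then 409
     else if ([ "should be", "cannot", "discount_value should be", "discount_type should be",
                "chk_discount_value_valid", "chk_original_price_positive",
                "chk_expiration_after_start", "chk_promotion_type_after_start"
              ].any (fun k => PySem.Str.isIn k m)) then 422
     else 400) := by
  split_ifs with h1 h2 h3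
  · -- 404 ∈ codes and is the least possible code
    have h404 : (404 : Int) ∈ pvCodes m :=
      (mem_pvCodes m 404).2 ⟨"not found", by simp [pvKeywordCodes], h1⟩
    rcases hmin : PySem.List.min? (pvCodes m) (fun x => x) with _ | c
    · exact absurd ((PySem.List.min?_eq_none_iff _ _).1 hmin ▸ h404) (List.not_mem_nil)
    · have hle : c ≤ 404 := PySem.List.min?_isMin hmin 404 h404
      have hmem := PySem.List.min?_mem hmin
      have : c = 404 := by
        rcases pvCodes_classified m c hmem with ⟨hc, _⟩ | ⟨hc, _⟩ | ⟨hc, _⟩ <;> omega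
      simp [this]
  · -- 409 ∈ codes; 404 is not (h1), so min = 409
    have h409 : (409 : Int) ∈ pvCodes m := by
      rcases Bool.or_eq_true_iff.1 h2 with h | h
      · rcases Bool.or_eq_true_iff.1 h with h | h
        · exact (mem_pvCodes m 409).2 ⟨"duplicate", by simp [pvKeywordCodes], h⟩
        · exact (mem_pvCodes m 409).2 ⟨"unique", by simp [pvKeywordCodes], h⟩
      · exact (mem_pvCodes m 409).2 ⟨"1062", by simp [pvKeywordCodes], h⟩
    rcases hmin : PySem.List.min? (pvCodes m) (fun x => x) with _ | c
    · exact absurd ((PySem.List.min?_eq_none_iff _ _).1 hmin ▸ h409) (List.not_mem_nil)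
    · have hle : c ≤ 409 := PySem.List.min?_isMin hmin 409 h409
      have hmem := PySem.List.min?_mem hmin
      have : c = 409 := by
        rcases pvCodes_classified m c hmem with ⟨hc, hk⟩ | ⟨hc, _⟩ | ⟨hc, _⟩
        · exact absurd hk h1
        · omega
        · omega
      simp [this]
  · -- 422 ∈ codes; 404/409 are not (h1,h2), so min = 422
    have h422 : (422 : Int) ∈ pvCodes m := by
      simp only [List.any_cons, List.any_nil, Bool.or_eq_true, Bool.or_false] at h3
      rcases h3 with h | h | h | h | h | h | h | h
      · exact (mem_pvCodes m 422).2 ⟨"should be", by simp [pvKeywordCodes], h⟩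
      · exact (mem_pvCodes m 422).2 ⟨"cannot", by simp [pvKeywordCodes], h⟩
      · exact (mem_pvCodes m 422).2 ⟨"discount_value should be", by simp [pvKeywordCodes], h⟩
      · exact (mem_pvCodes m 422).2 ⟨"discount_type should be", by simp [pvKeywordCodes], h⟩
      · exact (mem_pvCodes m 422).2 ⟨"chk_discount_value_valid", by simp [pvKeywordCodes], h⟩
      · exact (mem_pvCodes m 422).2 ⟨"chk_original_price_positive", by simp [pvKeywordCodes], h⟩
      · exact (mem_pvCodes m 422).2 ⟨"chk_expiration_after_start", by simp [pvKeywordCodes], h⟩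
      · exact (mem_pvCodes m 422).2 ⟨"chk_promotion_type_after_start", by simp [pvKeywordCodes], h⟩
    rcases hmin : PySem.List.min? (pvCodes m) (fun x => x) with _ | c
    · exact absurd ((PySem.List.min?_eq_none_iff _ _).1 hmin ▸ h422) (List.not_mem_nil)
    · have hmem := PySem.List.min?_mem hmin
      rcases pvCodes_classified m c hmem with ⟨hc, hk⟩ | ⟨hc, hk⟩ | ⟨hc, _⟩
      · exact absurd hk (by simp_all)
      · exact absurd hk (by simp_all)
      · simp [hc]
  · -- no keyword matches: codes is empty
    have hnil : pvCodes m = [] := by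
      by_contra hne
      rcases List.exists_mem_of_ne_nil _ hne with ⟨c, hc⟩
      rcases pvCodes_classified m c hc with ⟨_, hk⟩ | ⟨_, hk⟩ | ⟨_, hk⟩
      · exact absurd hk h1
      · exact absurd hk h2
      · exact absurd hk h3
    rw [hnil]
    rfl

-- ===== VERDICT (by name: the statement is the Claim_ definition above) =====
theorem classify_duplicate_error_spec : Claim_equal_classify_duplicate_error := by
  intro error _
  simp only [Spec_classify_duplicate_error, classify_duplicate_error, classify_duplicate_error_alt]
  rw [pvCodes_min_eq (PySem.Str.lower error)]
  split_ifs <;> rfl
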